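-- pv_equiv track=rewrite | github.com/nayanamana/PhD | priv_analysis_govt_sites/scripts/analysis/process_android_apps_popular.py | get_merged_perm_tokens
-- ===== SOURCE A (Python) =====
-- def get_merged_perm_tokens(perm_list):
--     token_dict_res = {}
--
--     for p in perm_list:
--         p = p.lower()
--         p_split = p.split('_')
--         p_merged = ' '.join(p_split)
--         if p_merged not in token_dict_res: token_dict_res[p_merged] = 1
--         #for t in p_split:
--         #    if t not in token_dict_res:
--         #        token_dict_res[t.lower()] = 1
--     token_dict_res = sorted(token_dict_res)
--     return token_dict_res
-- ===== SOURCE B (Python) =====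
-- def get_merged_perm_tokens(perm_list):
--     tokens = sorted(' '.join(p.lower().split('_')) for p in perm_list)
--     out = []
--     for t in tokens:
--         if not out or out[-1] != t:
--             out.append(t)
--     return out
-- ===== Notes on version B (the rewrite author's own statement) =====
-- stated objective: alternative
-- what changed: Replaces A's hash-dict dedup-then-sort with normalize-all, sort the full list (duplicates included), then a single adjacent-pass dedup comparing each element to the previous kept one.
import Mathlib
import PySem

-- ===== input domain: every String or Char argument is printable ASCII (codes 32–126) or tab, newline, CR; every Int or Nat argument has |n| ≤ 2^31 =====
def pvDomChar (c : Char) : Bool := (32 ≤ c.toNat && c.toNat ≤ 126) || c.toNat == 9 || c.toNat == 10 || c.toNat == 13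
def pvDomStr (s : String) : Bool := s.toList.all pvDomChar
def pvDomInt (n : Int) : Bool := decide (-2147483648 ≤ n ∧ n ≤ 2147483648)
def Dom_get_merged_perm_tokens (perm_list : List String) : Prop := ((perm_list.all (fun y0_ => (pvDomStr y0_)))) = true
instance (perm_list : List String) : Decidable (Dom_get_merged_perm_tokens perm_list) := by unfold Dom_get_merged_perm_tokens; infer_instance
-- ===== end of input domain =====

-- B replaces A's dict-based dedup-then-sort by sort-everything-then-adjacent-dedup (alternative decomposition, same cost).

-- ===== PORT A =====
-- p.split('_') is PySem.Str.split? p "_"; sep = "_" ≠ "" so it never raises: .getD [] is exact here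
def get_merged_perm_tokens (perm_list : List String) : List String :=
  let token_dict_res : PySem.Dict String Int :=
    perm_list.foldl (fun d p =>
      let p := PySem.Str.lower p
      let p_split := (PySem.Str.split? p "_").getD []
      let p_merged := PySem.Str.join " " p_split
      if d.contains p_merged then d else d.insert p_merged 1) PySem.Dict.empty
  PySem.List.sorted token_dict_res.keys (fun x => x) false

-- ===== PORT B =====
def get_merged_perm_tokens_alt (perm_list : List String) : List String :=
  let tokens :=
    PySem.List.sorted
      (perm_list.map (fun p => PySem.Str.join " " ((PySem.Str.split? (PySem.Str.lower p) "_").getD [])))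
      (fun x => x) false
  tokens.foldl (fun out t => if out = [] ∨ out.getLast? ≠ some t then out ++ [t] else out) []

-- ===== PRECONDITION & SPEC =====
def Spec_get_merged_perm_tokens (perm_list : List String) (out : List String) : Prop := out = get_merged_perm_tokens_alt perm_list
instance (perm_list : List String) (out : List String) : Decidable (Spec_get_merged_perm_tokens perm_list out) := by unfold Spec_get_merged_perm_tokens; infer_instance

-- ===== CLAIM (what is proved, stated in full; the proofs are below) =====
def Claim_equal_get_merged_perm_tokens : Prop := ∀ (perm_list : List String), Dom_get_merged_perm_tokens perm_list → Spec_get_merged_perm_tokens perm_list (get_merged_perm_tokens perm_list)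

-- ===== LEMMAS AND PROOFS =====

/-- The normalisation both programs apply to each permission string. -/
def pvNorm (p : String) : String :=
  PySem.Str.join " " ((PySem.Str.split? (PySem.Str.lower p) "_").getD [])

/-- Adjacent dedup of a list, given the previously kept element. -/
def pvDD (prev : String) : List String → List String
  | [] => []
  | t :: ts => if t = prev then pvDD prev ts else t :: pvDD t ts

lemma pvFoldl_dd (l : List String) : ∀ (acc : List String) (m : String), acc.getLast? = some m →
    l.foldl (fun out t => if out = [] ∨ out.getLast? ≠ some t then out ++ [t] else out) acc
      = acc ++ pvDD m l := by
  induction l with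
  | nil => intro acc m _; simp [pvDD]
  | cons t ts ih =>
    intro acc m hm
    have hne : acc ≠ [] := by intro h; simp [h] at hm
    by_cases ht : t = m
    · subst ht
      rw [List.foldl_cons, if_neg (by simp [hne, hm]), ih acc t hm]
      simp [pvDD]
    · have hcond : acc = [] ∨ acc.getLast? ≠ some t := by
        right; rw [hm]; exact fun hc => ht (Option.some.inj hc).symm
      rw [List.foldl_cons, if_pos hcond, ih (acc ++ [t]) t (by simp)]
      simp [pvDD, ht]

lemma pvMem_dd : ∀ (l : List String) (prev x : String), l.Pairwise (· ≤ ·) →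
    (∀ y ∈ l, prev ≤ y) → (x ∈ pvDD prev l ↔ x ∈ l ∧ x ≠ prev) := by
  intro l
  induction l with
  | nil => intro prev x _ _; simp [pvDD]
  | cons a ts ih =>
    intro prev x hp hge
    have hpts : ts.Pairwise (· ≤ ·) := hp.of_cons
    have hats : ∀ y ∈ ts, a ≤ y := fun y hy => (List.pairwise_cons.mp hp).1 y hy
    by_cases ha : a = prev
    · subst ha
      simp only [pvDD, if_true]
      rw [ih a x hpts hats]
      constructor
      · rintro ⟨h1, h2⟩; exact ⟨List.mem_cons_of_mem _ h1, h2⟩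
      · rintro ⟨h1, h2⟩
        rcases List.mem_cons.mp h1 with h | h
        · exact absurd h h2
        · exact ⟨h, h2⟩
    · have hlt : prev < a := lt_of_le_of_ne (hge a (by simp)) (Ne.symm ha)
      simp only [pvDD, if_neg ha]
      constructor
      · intro hx
        rcases List.mem_cons.mp hx with h | h
        · subst h; exact ⟨by simp, ha⟩
        · obtain ⟨h1, h2⟩ := (ih a x hpts hats).mp h
          have hax : a ≤ x := hats x h1
          exact ⟨List.mem_cons_of_mem _ h1,
            fun hxp => absurd (hxp ▸ hax) (not_le.mpr hlt)⟩
      · rintro ⟨h1, h2⟩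
        rcases List.mem_cons.mp h1 with h | h
        · subst h; simp
        · by_cases hxa : x = a
          · subst hxa; simp
          · exact List.mem_cons_of_mem _ ((ih a x hpts hats).mpr ⟨h, hxa⟩)

lemma pvDD_strict : ∀ (l : List String) (prev : String), l.Pairwise (· ≤ ·) →
    (∀ y ∈ l, prev ≤ y) → (pvDD prev l).Pairwise (· < ·) ∧ ∀ x ∈ pvDD prev l, prev < x := by
  intro l
  induction l with
  | nil => intro prev _ _; simp [pvDD]
  | cons a ts ih =>
    intro prev hp hge
    have hpts : ts.Pairwise (· ≤ ·) := hp.of_cons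
    have hats : ∀ y ∈ ts, a ≤ y := fun y hy => (List.pairwise_cons.mp hp).1 y hy
    by_cases ha : a = prev
    · subst ha; simp only [pvDD, if_true]; exact ih a hpts hats
    · have hlt : prev < a := lt_of_le_of_ne (hge a (by simp)) (Ne.symm ha)
      obtain ⟨hpw, hgt⟩ := ih a hpts hats
      simp only [pvDD, if_neg ha]
      refine ⟨List.pairwise_cons.mpr ⟨hgt, hpw⟩, ?_⟩
      intro x hx
      rcases List.mem_cons.mp hx with h | h
      · exact h ▸ hlt
      · exact lt_trans hlt (hgt x h)

lemma pvMem_keys_foldA : ∀ (xs : List String) (d : PySem.Dict String Int) (x : String),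
    (x ∈ (xs.foldl (fun d k => if d.contains k then d else d.insert k 1) d).keys
      ↔ x ∈ d.keys ∨ x ∈ xs) := by
  intro xs
  induction xs with
  | nil => intro d x; simp
  | cons k ks ih =>
    intro d x
    simp only [List.foldl_cons]
    by_cases hc : d.contains k
    · rw [if_pos hc, ih]
      have hk : k ∈ d.keys := (PySem.Dict.contains_iff_mem_keys d k).mp hc
      constructor
      · rintro (h | h)
        · exact Or.inl h
        · exact Or.inr (List.mem_cons_of_mem _ h)
      · rintro (h | h)
        · exact Or.inl h
        · rcases List.mem_cons.mp h with h | h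
          · exact Or.inl (h ▸ hk)
          · exact Or.inr h
    · rw [if_neg hc, ih]
      rw [PySem.Dict.mem_keys_insert]
      constructor
      · rintro (⟨h | h⟩ | h)
        · exact Or.inr (by simp [h])
        · exact Or.inl h
        · exact Or.inr (List.mem_cons_of_mem _ h)
      · rintro (h | h)
        · exact Or.inl (Or.inr h)
        · rcases List.mem_cons.mp h with h | h
          · exact Or.inl (Or.inl h)
          · exact Or.inr h

lemma pvNodup_keys_foldA : ∀ (xs : List String) (d : PySem.Dict String Int),
    d.keys.Nodup → (xs.foldl (fun d k => if d.contains k then d else d.insert k 1) d).keys.Nodup := by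
  intro xs
  induction xs with
  | nil => intro d h; simpa using h
  | cons k ks ih =>
    intro d h
    simp only [List.foldl_cons]
    by_cases hc : d.contains k
    · rw [if_pos hc]; exact ih d h
    · rw [if_neg hc]; exact ih _ (PySem.Dict.nodup_keys_insert d k 1 h)

-- ===== VERDICT (by name: the statement is the Claim_ definition above) =====
theorem get_merged_perm_tokens_spec : Claim_equal_get_merged_perm_tokens := by
  intro perm_list _
  unfold Spec_get_merged_perm_tokens get_merged_perm_tokens get_merged_perm_tokens_alt
  dsimp only
  have hfoldA : perm_list.foldl (fun (d : PySem.Dict String Int) p =>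
      let p := PySem.Str.lower p
      let p_split := (PySem.Str.split? p "_").getD []
      let p_merged := PySem.Str.join " " p_split
      if d.contains p_merged then d else d.insert p_merged 1) PySem.Dict.empty
      = (perm_list.map pvNorm).foldl
          (fun d k => if d.contains k then d else d.insert k 1) PySem.Dict.empty := by
    rw [List.foldl_map]; rfl
  have hmap : perm_list.map
      (fun p => PySem.Str.join " " ((PySem.Str.split? (PySem.Str.lower p) "_").getD []))
      = perm_list.map pvNorm := rfl
  rw [hfoldA, hmap]
  show PySem.List.sorted
      ((perm_list.map pvNorm).foldl (fun d k => if d.contains k then d else d.insert k 1)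
        (PySem.Dict.empty : PySem.Dict String Int)).keys (fun x => x) false
    = List.foldl (fun out t => if out = [] ∨ out.getLast? ≠ some t then out ++ [t] else out) []
        (PySem.List.sorted (perm_list.map pvNorm) (fun x => x) false)
  set K := ((perm_list.map pvNorm).foldl
      (fun d k => if d.contains k then d else d.insert k 1)
      (PySem.Dict.empty : PySem.Dict String Int)).keys with hK
  clear_value K
  have hKmem : ∀ x, x ∈ K ↔ x ∈ perm_list.map pvNorm := by
    intro x; rw [hK, pvMem_keys_foldA]; simp
  have hKnd : K.Nodup := by
    rw [hK]
    exact pvNodup_keys_foldA (perm_list.map pvNorm) PySem.Dict.empty (by simp)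
  cases hs : PySem.List.sorted (perm_list.map pvNorm) (fun x => x) false with
  | nil =>
    have ht0 : perm_list.map pvNorm = [] :=
      (PySem.List.sorted_eq_nil_iff (perm_list.map pvNorm) (fun x => x) false).mp hs
    have hKeq : K = [] := by
      cases hKe : K with
      | nil => rfl
      | cons a t =>
        have : a ∈ perm_list.map pvNorm := (hKmem a).mp (by simp [hKe])
        rw [ht0] at this
        simp at this
    rw [hKeq]
    rfl
  | cons t ts =>
    have hpair : (t :: ts).Pairwise (· ≤ ·) := by
      have h := PySem.List.sorted_pairwise (perm_list.map pvNorm) (fun x : String => x)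
      rw [hs] at h; exact h
    have hpts : ts.Pairwise (· ≤ ·) := hpair.of_cons
    have htts : ∀ y ∈ ts, t ≤ y := fun y hy => (List.pairwise_cons.mp hpair).1 y hy
    have hB : (t :: ts).foldl
        (fun out t => if out = [] ∨ out.getLast? ≠ some t then out ++ [t] else out) ([] : List String)
        = t :: pvDD t ts := by
      rw [List.foldl_cons, if_pos (Or.inl rfl), List.nil_append]
      exact pvFoldl_dd ts [t] t (by simp)
    rw [hB]
    obtain ⟨hddpw, hddgt⟩ := pvDD_strict ts t hpts htts
    have hpwlt : (t :: pvDD t ts).Pairwise (· < ·) := List.pairwise_cons.mpr ⟨hddgt, hddpw⟩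
    have hmemdd : ∀ x, x ∈ t :: pvDD t ts ↔ x ∈ t :: ts := by
      intro x
      rw [List.mem_cons, List.mem_cons, pvMem_dd ts t x hpts htts]
      constructor
      · rintro (h | ⟨h1, _⟩)
        · exact Or.inl h
        · exact Or.inr h1
      · rintro (h | h)
        · exact Or.inl h
        · by_cases hxt : x = t
          · exact Or.inl hxt
          · exact Or.inr ⟨h, hxt⟩
    have hperm : (t :: pvDD t ts).Perm K := by
      rw [List.perm_ext_iff_of_nodup (hpwlt.imp ne_of_lt) hKnd]
      intro x
      rw [hmemdd x, hKmem x, ← hs]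
      exact PySem.List.mem_sorted (perm_list.map pvNorm) (fun x => x) false x
    exact PySem.List.sorted_eq_of_perm_of_pairwise_lt K (t :: pvDD t ts) (fun x => x) hperm hpwlt
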